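-- pv_equiv track=rewrite | github.com/sanjalapradhan/03220363_BIA101_CAP3 | BIA101_CAP3_03220363.py | extract_two_digit_number
-- ===== SOURCE A (Python) =====
-- def extract_two_digit_number(line):
--     first_digit = None
--     last_digit = None
--
--     for char in line:
--         if char.isdigit():
--             first_digit = char
--             break
--
--     for char in reversed(line):
--         if char.isdigit():
--             last_digit = char
--             break
--
--     if first_digit and last_digit:
--         return int(first_digit + last_digit)
--     else:
--         return 0
-- ===== SOURCE B (Python) =====
-- def extract_two_digit_number(line):
--     digits = [c for c in line if c.isdigit()]
--     return int(digits[0] + digits[-1]) if digits else 0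
-- ===== Notes on version B (the rewrite author's own statement) =====
-- stated objective: simpler
-- what changed: Replaces the two opposite-direction early-break scans with a single filter pass collecting all digits, then reads the first and last element.
import Mathlib
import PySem

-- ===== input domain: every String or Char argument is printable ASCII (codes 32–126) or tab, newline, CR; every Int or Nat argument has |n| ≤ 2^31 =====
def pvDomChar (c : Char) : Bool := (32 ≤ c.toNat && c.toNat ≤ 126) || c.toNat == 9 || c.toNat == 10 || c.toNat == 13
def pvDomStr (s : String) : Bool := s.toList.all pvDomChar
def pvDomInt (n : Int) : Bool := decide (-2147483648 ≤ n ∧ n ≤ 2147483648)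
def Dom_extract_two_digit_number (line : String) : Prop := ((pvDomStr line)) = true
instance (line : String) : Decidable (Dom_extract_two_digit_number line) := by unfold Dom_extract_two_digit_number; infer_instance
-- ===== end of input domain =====

-- B replaces A's two opposite-direction early-break scans by one filter pass plus first/last lookup (objective: simpler).

-- ===== PORT A =====
-- the forward 'for char in line: if char.isdigit(): first_digit = char; break' loop
def pvFindDigit : List Char → Option Char
  | [] => none
  | c :: rest => if PySem.Chars.isdigit c then some c else pvFindDigit rest

def extract_two_digit_number (line : String) : Int :=
  let first_digit := pvFindDigit line.toList
  let last_digit := pvFindDigit line.toList.reverse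
  match first_digit, last_digit with
  | some a, some b => (PySem.Int.ofStr? (String.mk [a, b])).getD 0  -- int(a+b); always succeeds on two digit chars
  | _, _ => 0

-- ===== PORT B =====
def extract_two_digit_number_alt (line : String) : Int :=
  let digits := line.toList.filter PySem.Chars.isdigit
  if h : digits = [] then 0
  else (PySem.Int.ofStr? (String.mk [digits.head h, digits.getLast h])).getD 0  -- int(digits[0]+digits[-1])

-- ===== PRECONDITION & SPEC =====
def Spec_extract_two_digit_number (line : String) (out : Int) : Prop := out = extract_two_digit_number_alt line
instance (line : String) (out : Int) : Decidable (Spec_extract_two_digit_number line out) := by unfold Spec_extract_two_digit_number; infer_instance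

-- ===== CLAIM (what is proved, stated in full; the proofs are below) =====
def Claim_equal_extract_two_digit_number : Prop := ∀ (line : String), Dom_extract_two_digit_number line → Spec_extract_two_digit_number line (extract_two_digit_number line)

-- ===== LEMMAS AND PROOFS =====
theorem pvFindDigit_eq_head_filter (l : List Char) :
    pvFindDigit l = (l.filter PySem.Chars.isdigit).head? := by
  induction l with
  | nil => rfl
  | cons c rest ih =>
    simp only [pvFindDigit, List.filter_cons]
    by_cases h : PySem.Chars.isdigit c <;> simp [h, ih]

-- ===== VERDICT (by name: the statement is the Claim_ definition above) =====
theorem extract_two_digit_number_spec : Claim_equal_extract_two_digit_number := by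
  intro line _
  unfold Spec_extract_two_digit_number extract_two_digit_number extract_two_digit_number_alt
  simp only [pvFindDigit_eq_head_filter, List.filter_reverse, List.head?_reverse]
  cases h : line.toList.filter PySem.Chars.isdigit with
  | nil => simp [h]
  | cons d rest =>
    simp [h, List.head?_eq_head, List.getLast?_eq_getLast, List.head]
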